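-- pv_equiv track=rewrite | github.com/AllenWang314/cryptogram-solver | backend/algorithms/decode.py | find_double_letters
-- ===== SOURCE A (Python) =====
-- def find_double_letters(ciphertext):
--     # find all the double letters
--     freqs = {}
--     for i in range(len(ciphertext)-1):
--         if (ciphertext[i] == ciphertext[i+1]):
--             if (ciphertext[i] not in freqs.keys()):
--                 freqs[ciphertext[i]] = 1
--             else:
--                 freqs[ciphertext[i]] += 1
--     # order them by frequency
--     double_letters = list(freqs.keys())
--     double_letters.sort(key = lambda x: freqs[x], reverse = True)
--     return double_letters
-- ===== SOURCE B (Python) =====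
-- def find_double_letters(ciphertext):
--     # run-based single pass: each maximal run of length L contributes L-1 doubles
--     freqs = {}
--     n = len(ciphertext)
--     i = 0
--     while i < n:
--         j = i + 1
--         while j < n and ciphertext[j] == ciphertext[i]:
--             j += 1
--         if j - i >= 2:
--             c = ciphertext[i]
--             freqs[c] = freqs.get(c, 0) + (j - i - 1)
--         i = j
--     return sorted(freqs, key=lambda x: freqs[x], reverse=True)
-- ===== Notes on version B (the rewrite author's own statement) =====
-- stated objective: alternative
-- what changed: Replaces the pairwise index scan (comparing s[i] to s[i+1] for every i) with a single run-based pass: each maximal run of equal characters of length L contributes L-1 to that character's count in one dict update, then the same stable reverse sort by frequency.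
import Mathlib
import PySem

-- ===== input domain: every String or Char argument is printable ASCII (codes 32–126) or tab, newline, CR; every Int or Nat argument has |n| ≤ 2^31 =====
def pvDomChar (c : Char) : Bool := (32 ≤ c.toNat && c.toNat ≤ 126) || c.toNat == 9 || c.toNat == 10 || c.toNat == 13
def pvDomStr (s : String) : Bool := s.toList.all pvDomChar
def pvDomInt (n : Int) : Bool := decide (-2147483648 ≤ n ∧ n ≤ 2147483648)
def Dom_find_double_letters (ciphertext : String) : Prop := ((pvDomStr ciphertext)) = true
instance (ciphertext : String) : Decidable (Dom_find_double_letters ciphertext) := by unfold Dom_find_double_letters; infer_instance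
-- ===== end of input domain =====

-- ===== PORT A =====
-- B changes the counting pass to a run-based scan (alternative decomposition); same output proved equal.
def pvBumpA (d : PySem.Dict Char Int) (c : Char) : PySem.Dict Char Int :=
  if d.contains c then d.insert c (d.getD c 0 + 1) else d.insert c 1

def pvLoopA : List Char → PySem.Dict Char Int → PySem.Dict Char Int
  | a :: b :: rest, d => pvLoopA (b :: rest) (if a == b then pvBumpA d a else d)
  | _, d => d

def find_double_letters (ciphertext : String) : List String :=
  let freqs := pvLoopA ciphertext.toList PySem.Dict.empty
  (PySem.List.sorted freqs.keys (fun x => freqs.getD x 0) true).map (fun c => String.ofList [c])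

-- ===== PORT B =====
def pvRunB : List Char → PySem.Dict Char Int → PySem.Dict Char Int
  | [], d => d
  | c :: rest, d =>
      let run := rest.takeWhile (fun x => x == c)
      let d' := if run.length + 1 ≥ 2 then d.insert c (d.getD c 0 + ((run.length : Int) + 1 - 1)) else d
      pvRunB (rest.dropWhile (fun x => x == c)) d'
termination_by cs _ => cs.length
decreasing_by
  simp only [List.length_cons]
  have := (List.dropWhile_sublist (l := rest) (p := fun x => x == c)).length_le
  omega

def find_double_letters_alt (ciphertext : String) : List String :=
  let freqs := pvRunB ciphertext.toList PySem.Dict.empty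
  (PySem.List.sorted freqs.keys (fun x => freqs.getD x 0) true).map (fun c => String.ofList [c])

-- ===== PRECONDITION & SPEC =====
def Spec_find_double_letters (ciphertext : String) (out : List String) : Prop := out = find_double_letters_alt ciphertext
instance (ciphertext : String) (out : List String) : Decidable (Spec_find_double_letters ciphertext out) := by unfold Spec_find_double_letters; infer_instance

-- ===== CLAIM (what is proved, stated in full; the proofs are below) =====
def Claim_equal_find_double_letters : Prop := ∀ (ciphertext : String), Dom_find_double_letters ciphertext → Spec_find_double_letters ciphertext (find_double_letters ciphertext)

-- ===== LEMMAS AND PROOFS =====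
theorem pvBumpA_eq (d : PySem.Dict Char Int) (c : Char) :
    pvBumpA d c = d.insert c (d.getD c 0 + 1) := by
  unfold pvBumpA
  by_cases h : d.contains c = true
  · simp [h]
  · simp only [Bool.not_eq_true] at h
    rw [if_neg (by simp [h]), PySem.Dict.getD_of_not_contains d 0 h]
    norm_num

theorem pvLoopA_run (k : Nat) (c : Char) (rest' : List Char) (d : PySem.Dict Char Int)
    (h : ∀ x, rest'.head? = some x → (x == c) = false) :
    pvLoopA (c :: (List.replicate k c ++ rest')) d
      = pvLoopA rest' (if 1 ≤ k then d.insert c (d.getD c 0 + (k : Int)) else d) := by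
  induction k generalizing d with
  | zero =>
      rw [List.replicate, List.nil_append, if_neg (by omega)]
      cases rest' with
      | nil => rfl
      | cons x t =>
          have hx : (x == c) = false := h x rfl
          have : (c == x) = false := by
            cases hcx : (c == x) with
            | false => rfl
            | true => rw [eq_of_beq hcx] at hx; simp at hx
          simp only [pvLoopA, this, if_neg Bool.false_ne_true]
  | succ k ih =>
      have step : pvLoopA (c :: (List.replicate (k+1) c ++ rest')) d
          = pvLoopA (c :: (List.replicate k c ++ rest')) (pvBumpA d c) := by
        simp [pvLoopA, List.replicate]
      rw [step, ih (pvBumpA d c), pvBumpA_eq]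
      by_cases hk : 1 ≤ k
      · rw [if_pos hk, if_pos (by omega)]
        rw [PySem.Dict.getD_insert_self, PySem.Dict.insert_insert_self]
        congr 1
        push_cast
        ring_nf
      · have hk0 : k = 0 := by omega
        subst hk0
        rw [if_neg (by omega), if_pos (by omega)]
        norm_num

theorem loops_eq : ∀ (cs : List Char) (d : PySem.Dict Char Int), pvLoopA cs d = pvRunB cs d
  | [], d => by rw [pvRunB]; rfl
  | c :: rest, d => by
      have hsplit : rest = rest.takeWhile (fun x => x == c) ++ rest.dropWhile (fun x => x == c) :=
        (List.takeWhile_append_dropWhile).symm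
      have hrepl : rest.takeWhile (fun x => x == c)
          = List.replicate (rest.takeWhile (fun x => x == c)).length c := by
        rw [List.eq_replicate_iff]
        exact ⟨rfl, fun x hx => eq_of_beq (List.mem_takeWhile_imp (p := fun y => y == c) hx)⟩
      have hhead : ∀ x, (rest.dropWhile (fun x => x == c)).head? = some x → (x == c) = false := by
        intro x hx
        have h := List.find?_not_eq_head?_dropWhile (fun y => y == c) rest
        rw [hx] at h
        simpa using List.find?_some h
      have h1 : pvLoopA (c :: rest) d
          = pvLoopA (rest.dropWhile (fun x => x == c))
              (if 1 ≤ (rest.takeWhile (fun x => x == c)).length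
               then d.insert c (d.getD c 0 + ((rest.takeWhile (fun x => x == c)).length : Int))
               else d) := by
        conv_lhs => rw [hsplit, hrepl]
        exact pvLoopA_run _ c _ d hhead
      rw [h1, loops_eq]
      show _ = pvRunB (c :: rest) d
      rw [pvRunB]
      have hlen : ((rest.takeWhile (fun x => x == c)).length + 1 ≥ 2)
          = (1 ≤ (rest.takeWhile (fun x => x == c)).length) := by
        simp only [ge_iff_le, eq_iff_iff]; omega
      congr 1
      · simp only [hlen]
        split_ifs with h
        · norm_num
        · rfl
termination_by cs _ => cs.length
decreasing_by
  simp only [List.length_cons]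
  have := (List.dropWhile_sublist (l := rest) (p := fun x => x == c)).length_le
  omega

-- ===== VERDICT (by name: the statement is the Claim_ definition above) =====
theorem find_double_letters_spec : Claim_equal_find_double_letters := by
  intro s _
  show find_double_letters s = find_double_letters_alt s
  simp only [find_double_letters, find_double_letters_alt, loops_eq]
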